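-- pv_equiv track=rewrite | github.com/Dzmitry-Leushukou/Algorithms-and-data-structures-project | solves/py/bst.py | _find_median_nodes
-- ===== SOURCE A (Python) =====
-- def _find_median_nodes(paths):
--     to_delete = set()
--     for path in paths:
--         sorted_path = sorted(path)
--         n = len(sorted_path)
--         median = sorted_path[n // 2 - 1] if n % 2 == 0 else sorted_path[n // 2]
--         to_delete.add(median)
--     return to_delete
-- ===== SOURCE B (Python) =====
-- def _select(xs, k):
--     # iterative quickselect with first-element pivot and 3-way partition
--     while True:
--         pivot = xs[0]
--         less = [x for x in xs if x < pivot]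
--         if k < len(less):
--             xs = less
--             continue
--         eq = sum(1 for x in xs if x == pivot)
--         if k < len(less) + eq:
--             return pivot
--         xs = [x for x in xs if x > pivot]
--         k -= len(less) + eq
--
-- def _find_median_nodes(paths):
--     to_delete = set()
--     for path in paths:
--         to_delete.add(_select(path, (len(path) - 1) // 2))
--     return to_delete
-- ===== Notes on version B (the rewrite author's own statement) =====
-- stated objective: alternative
-- what changed: Replaces the full sort of every path by an iterative 3-way-partition quickselect (first-element pivot) that finds the value at median index (len-1)//2 directly; the set of medians is built the same way.
import Mathlib
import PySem

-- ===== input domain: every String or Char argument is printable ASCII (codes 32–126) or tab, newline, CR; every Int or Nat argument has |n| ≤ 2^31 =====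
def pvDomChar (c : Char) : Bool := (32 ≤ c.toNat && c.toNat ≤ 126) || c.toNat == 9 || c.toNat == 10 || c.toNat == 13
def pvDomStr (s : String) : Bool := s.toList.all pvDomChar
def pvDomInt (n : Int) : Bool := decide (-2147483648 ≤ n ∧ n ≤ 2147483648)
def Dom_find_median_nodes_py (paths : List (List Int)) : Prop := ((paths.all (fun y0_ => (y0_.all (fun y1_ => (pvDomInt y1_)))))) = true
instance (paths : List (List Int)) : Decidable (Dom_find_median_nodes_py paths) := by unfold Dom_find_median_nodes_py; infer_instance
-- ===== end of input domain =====

-- B replaces the per-path full sort by an iterative 3-way quickselect for the median index (len-1)//2; both raise IndexError on an empty path, which Pre_ excludes.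

-- ===== PORT A =====
def find_median_nodes_py (paths : List (List Int)) : List Int :=
  paths.foldl (fun to_delete path =>
    let sorted_path := PySem.List.sorted path (fun x => x) false
    let n : Int := (sorted_path.length : Int)
    -- sorted_path[…]: pyGet? is none exactly where Python raises IndexError (excluded by Pre_)
    let median : Int :=
      if PySem.Int.mod n 2 = 0 then
        (PySem.List.pyGet? sorted_path (PySem.Int.floordiv n 2 - 1)).getD 0
      else
        (PySem.List.pyGet? sorted_path (PySem.Int.floordiv n 2)).getD 0
    PySem.Set.add to_delete median) []

-- ===== PORT B =====
-- the while-loop of Source B's _select as recursion on the shrinking list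
def pvSelect (xs : List Int) (k : Int) : Int :=
  match xs with
  | [] => 0   -- xs[0] raises IndexError in Python (excluded by Pre_)
  | pivot :: rest =>
    let less := (pivot :: rest).filter (fun x => decide (x < pivot))
    if k < (less.length : Int) then pvSelect less k
    else
      let eq : Int := ((pivot :: rest).countP (fun x => decide (x = pivot)) : Int)
      if k < (less.length : Int) + eq then pivot
      else pvSelect ((pivot :: rest).filter (fun x => decide (pivot < x)))
             (k - ((less.length : Int) + eq))
termination_by xs.length
decreasing_by
  · exact (List.length_filter_lt_length_iff_exists).mpr
      ⟨pivot, List.mem_cons_self, by simp⟩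
  · exact (List.length_filter_lt_length_iff_exists).mpr
      ⟨pivot, List.mem_cons_self, by simp⟩

def find_median_nodes_py_alt (paths : List (List Int)) : List Int :=
  paths.foldl (fun to_delete path =>
    PySem.Set.add to_delete
      (pvSelect path (PySem.Int.floordiv ((path.length : Int) - 1) 2))) []

-- ===== PRECONDITION & SPEC =====
-- Pre_ excludes inputs containing an empty path, on which both A and B raise IndexError.
def Pre_find_median_nodes_py (paths : List (List Int)) : Prop := ∀ path ∈ paths, path ≠ []
instance (paths : List (List Int)) : Decidable (Pre_find_median_nodes_py paths) := by unfold Pre_find_median_nodes_py; infer_instance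
def pvWitness_find_median_nodes_py : List (List Int) := [[3, 1, 2, 5], [7], [4, 4, 0]]
def Spec_find_median_nodes_py (paths : List (List Int)) (out : List Int) : Prop := out = find_median_nodes_py_alt paths
instance (paths : List (List Int)) (out : List Int) : Decidable (Spec_find_median_nodes_py paths out) := by unfold Spec_find_median_nodes_py; infer_instance

-- ===== CLAIM (what is proved, stated in full; the proofs are below) =====
def Claim_equal_find_median_nodes_py : Prop := ∀ (paths : List (List Int)), Dom_find_median_nodes_py paths → Pre_find_median_nodes_py paths → Spec_find_median_nodes_py paths (find_median_nodes_py paths)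

-- ===== LEMMAS AND PROOFS =====

-- "v is the (k of kind Int)-th smallest of xs", characterised by counting, independent of order
def pvIsKth (xs : List Int) (k : Int) (v : Int) : Prop :=
  ((xs.countP (fun x => decide (x < v)) : Int) ≤ k) ∧
  (k < (xs.countP (fun x => decide (x ≤ v)) : Int))

theorem pvIsKth_uniq {xs : List Int} {k v w : Int}
    (hv : pvIsKth xs k v) (hw : pvIsKth xs k w) : v = w := by
  by_contra hne
  rcases lt_or_gt_of_ne hne with h | h
  · have hle : xs.countP (fun x => decide (x ≤ v)) ≤ xs.countP (fun x => decide (x < w)) :=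
      List.countP_mono_left (fun x _ hx => by
        simp only [decide_eq_true_eq] at *; omega)
    obtain ⟨hv1, hv2⟩ := hv; obtain ⟨hw1, hw2⟩ := hw
    have : (xs.countP (fun x => decide (x ≤ v)) : Int) ≤ (xs.countP (fun x => decide (x < w)) : Int) := by exact_mod_cast hle
    omega
  · have hle : xs.countP (fun x => decide (x ≤ w)) ≤ xs.countP (fun x => decide (x < v)) :=
      List.countP_mono_left (fun x _ hx => by
        simp only [decide_eq_true_eq] at *; omega)
    obtain ⟨hv1, hv2⟩ := hv; obtain ⟨hw1, hw2⟩ := hw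
    have : (xs.countP (fun x => decide (x ≤ w)) : Int) ≤ (xs.countP (fun x => decide (x < v)) : Int) := by exact_mod_cast hle
    omega

theorem pvCountP_split (xs : List Int) (p q : Int → Bool) :
    xs.countP p = xs.countP (fun x => p x && q x) + xs.countP (fun x => p x && !q x) := by
  induction xs with
  | nil => simp
  | cons a t ih =>
    simp only [List.countP_cons, ih]
    cases hp : p a <;> cases hq : q a <;> simp <;> omega

-- three-way bookkeeping for a pivot: |greater| + |less| + #equal = |xs|
theorem pvThreeWay (pivot : Int) (xs : List Int) :
    ((xs.filter (fun x => decide (pivot < x))).length : Int) +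
    ((xs.filter (fun x => decide (x < pivot))).length : Int) +
    (xs.countP (fun x => decide (x = pivot)) : Int) = (xs.length : Int) := by
  induction xs with
  | nil => simp
  | cons a t ih =>
    by_cases h1 : a < pivot <;> by_cases h2 : pivot < a <;> by_cases h3 : a = pivot <;>
      simp [h1, h2, h3] <;> omega

theorem pvCountLE_split (pivot : Int) (xs : List Int) :
    xs.countP (fun x => decide (x ≤ pivot))
      = xs.countP (fun x => decide (x < pivot)) + xs.countP (fun x => decide (x = pivot)) := by
  induction xs with
  | nil => simp
  | cons a t ih =>
    simp only [List.countP_cons, ih]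
    by_cases h1 : a ≤ pivot <;> by_cases h2 : a < pivot <;> by_cases h3 : a = pivot <;>
      simp [h1, h2, h3] <;> omega

theorem pvSelect_mem : ∀ (n : Nat) (xs : List Int), xs.length ≤ n → ∀ k : Int, 0 ≤ k →
    k < (xs.length : Int) → pvSelect xs k ∈ xs := by
  intro n
  induction n with
  | zero =>
    intro xs h k h0 hk
    have : (xs.length : Int) = 0 := by exact_mod_cast Nat.le_zero.mp h
    omega
  | succ n ih =>
    intro xs hlen k h0 hk
    match xs with
    | [] => simp at hk; omega
    | pivot :: rest =>
      rw [pvSelect]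
      simp only []
      set L := ((pivot :: rest).filter (fun x => decide (x < pivot))).length with hL
      split_ifs with h1 h2
      · -- recurse into less
        have hlt : ((pivot :: rest).filter (fun x => decide (x < pivot))).length < (pivot :: rest).length :=
          (List.length_filter_lt_length_iff_exists).mpr ⟨pivot, List.mem_cons_self, by simp⟩
        have := ih ((pivot :: rest).filter (fun x => decide (x < pivot)))
          (by omega) k h0 (by exact_mod_cast h1)
        exact List.mem_of_mem_filter this
      · exact List.mem_cons_self
      · -- recurse into greater
        have h3 := pvThreeWay pivot (pivot :: rest)
        have hglt : ((pivot :: rest).filter (fun x => decide (pivot < x))).length < (pivot :: rest).length :=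
          (List.length_filter_lt_length_iff_exists).mpr ⟨pivot, List.mem_cons_self, by simp⟩
        have := ih ((pivot :: rest).filter (fun x => decide (pivot < x)))
          (by omega)
          (k - ((L : Int) + ((pivot :: rest).countP (fun x => decide (x = pivot)) : Int)))
          (by omega) (by omega)
        exact List.mem_of_mem_filter this

theorem pvSelect_isKth : ∀ (n : Nat) (xs : List Int), xs.length ≤ n → ∀ k : Int, 0 ≤ k →
    k < (xs.length : Int) → pvIsKth xs k (pvSelect xs k) := by
  intro n
  induction n with
  | zero =>
    intro xs h k h0 hk
    have : (xs.length : Int) = 0 := by exact_mod_cast Nat.le_zero.mp h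
    omega
  | succ n ih =>
    intro xs hlen k h0 hk
    match xs with
    | [] => simp at hk; omega
    | pivot :: rest =>
      rw [pvSelect]
      simp only []
      set xs' := pivot :: rest with hxs
      set less := xs'.filter (fun x => decide (x < pivot)) with hless
      set greater := xs'.filter (fun x => decide (pivot < x)) with hgreater
      set E := xs'.countP (fun x => decide (x = pivot)) with hE
      have h3 := pvThreeWay pivot xs'
      rw [← hless, ← hgreater, ← hE] at h3
      have hLcnt : less.length = xs'.countP (fun x => decide (x < pivot)) := by
        rw [hless, List.countP_eq_length_filter]
      split_ifs with h1 h2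
      · -- v from less
        have hlt : less.length < xs'.length := by
          rw [hless, hxs]
          exact (List.length_filter_lt_length_iff_exists).mpr ⟨pivot, List.mem_cons_self, by simp⟩
        have hik := ih less (by omega) k h0 (by exact_mod_cast h1)
        have hmem := pvSelect_mem less.length less le_rfl k h0 (by exact_mod_cast h1)
        have hvp : pvSelect less k < pivot := by
          have hmem' := hmem
          rw [hless] at hmem'
          have := List.of_mem_filter hmem'
          simpa using this
        set v := pvSelect less k with hv
        have e1 : less.countP (fun x => decide (x < v)) = xs'.countP (fun x => decide (x < v)) := by
          rw [hless, List.countP_filter]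
          exact List.countP_congr (fun a _ => by
            by_cases h : a < pivot
            · simp [h]
            · simp [h, not_lt.mpr (hvp.le.trans (not_lt.mp h))])
        have e2 : less.countP (fun x => decide (x ≤ v)) = xs'.countP (fun x => decide (x ≤ v)) := by
          rw [hless, List.countP_filter]
          exact List.countP_congr (fun a _ => by
            by_cases h : a < pivot
            · simp [h]
            · simp [h, not_le.mpr (lt_of_lt_of_le hvp (not_lt.mp h))])
        obtain ⟨c1, c2⟩ := hik
        exact ⟨by rw [← e1]; exact c1, by rw [← e2]; exact c2⟩
      · -- pivot itself
        constructor
        · rw [← hLcnt]; omega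
        · have hsp := pvCountLE_split pivot xs'
          omega
      · -- v from greater
        set k' := k - ((less.length : Int) + (E : Int)) with hk'
        have hglt : greater.length < xs'.length := by
          rw [hgreater, hxs]
          exact (List.length_filter_lt_length_iff_exists).mpr ⟨pivot, List.mem_cons_self, by simp⟩
        have hkg : k' < (greater.length : Int) := by omega
        have hik := ih greater (by omega) k' (by omega) hkg
        have hmem := pvSelect_mem greater.length greater le_rfl k' (by omega) hkg
        have hvp : pivot < pvSelect greater k' := by
          have hmem' := hmem
          rw [hgreater] at hmem'
          have := List.of_mem_filter hmem'
          simpa using this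
        set v := pvSelect greater k' with hv
        have hLE : xs'.countP (fun x => decide (x ≤ pivot)) = less.length + E := by
          have hsp := pvCountLE_split pivot xs'
          omega
        have ha1 : xs'.countP (fun x => decide (x < v) && decide (pivot < x))
            = greater.countP (fun x => decide (x < v)) := by
          rw [hgreater, List.countP_filter]
        have hb1 : xs'.countP (fun x => decide (x < v) && !decide (pivot < x))
            = xs'.countP (fun x => decide (x ≤ pivot)) :=
          List.countP_congr (fun a _ => by
            by_cases h : a ≤ pivot
            · simp [h, not_lt.mpr h, lt_of_le_of_lt h hvp]
            · simp [h, not_le.mp h])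
        have ha2 : xs'.countP (fun x => decide (x ≤ v) && decide (pivot < x))
            = greater.countP (fun x => decide (x ≤ v)) := by
          rw [hgreater, List.countP_filter]
        have hb2 : xs'.countP (fun x => decide (x ≤ v) && !decide (pivot < x))
            = xs'.countP (fun x => decide (x ≤ pivot)) :=
          List.countP_congr (fun a _ => by
            by_cases h : a ≤ pivot
            · simp [h, not_lt.mpr h, h.trans hvp.le]
            · simp [h, not_le.mp h])
        have hs1 := pvCountP_split xs' (fun x => decide (x < v)) (fun x => decide (pivot < x))
        have hs2 := pvCountP_split xs' (fun x => decide (x ≤ v)) (fun x => decide (pivot < x))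
        obtain ⟨c1, c2⟩ := hik
        exact ⟨by omega, by omega⟩

-- the j-th element of a ≤-sorted list satisfies the counting characterisation
theorem pvSorted_isKth (s : List Int) (hs : s.Pairwise (fun a b => a ≤ b))
    (j : Nat) (hj : j < s.length) : pvIsKth s (j : Int) s[j] := by
  have hpg := List.pairwise_iff_getElem.mp hs
  have htd : s = s.take j ++ s.drop j := (List.take_append_drop j s).symm
  constructor
  · -- countP (< s[j]) s ≤ j
    have hdz : (s.drop j).countP (fun x => decide (x < s[j])) = 0 := by
      refine List.countP_eq_zero.mpr (fun a ha => ?_)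
      obtain ⟨i, hi, hval⟩ := List.mem_iff_getElem.mp ha
      rw [List.getElem_drop] at hval
      subst hval
      have hilen : i < s.length - j := by simpa [List.length_drop] using hi
      rcases Nat.eq_zero_or_pos i with h0 | h0
      · simp [h0]
      · have := hpg j (j + i) hj (by omega) (by omega)
        simp only [decide_eq_true_eq]; omega
    have hsum : s.countP (fun x => decide (x < s[j]))
        = (s.take j).countP (fun x => decide (x < s[j]))
          + (s.drop j).countP (fun x => decide (x < s[j])) := by
      have h : ((s.take j) ++ (s.drop j)).countP (fun x => decide (x < s[j]))
          = (s.take j).countP (fun x => decide (x < s[j]))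
            + (s.drop j).countP (fun x => decide (x < s[j])) := List.countP_append ..
      rwa [List.take_append_drop] at h
    have hle : (s.take j).countP (fun x => decide (x < s[j])) ≤ j := by
      calc (s.take j).countP _ ≤ (s.take j).length := List.countP_le_length ..
        _ ≤ j := by rw [List.length_take]; omega
    rw [hsum, hdz]
    exact_mod_cast by omega
  · -- j < countP (≤ s[j]) s
    have hta : (s.take j).countP (fun x => decide (x ≤ s[j])) = j := by
      have : ∀ a ∈ s.take j, decide (a ≤ s[j]) = true := by
        intro a ha
        obtain ⟨i, hi, hval⟩ := List.mem_iff_getElem.mp ha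
        rw [List.getElem_take] at hval
        subst hval
        have hij : i < j := by rw [List.length_take] at hi; omega
        have := hpg i j (by omega) hj hij
        simpa using this
      rw [List.countP_eq_length.mpr this, List.length_take]; omega
    have hdc : 1 ≤ (s.drop j).countP (fun x => decide (x ≤ s[j])) := by
      have hdrop : s.drop j = s[j] :: s.drop (j + 1) := List.drop_eq_getElem_cons hj
      rw [hdrop, List.countP_cons_of_pos (by simp)]
      omega
    have hsum : s.countP (fun x => decide (x ≤ s[j]))
        = (s.take j).countP (fun x => decide (x ≤ s[j]))
          + (s.drop j).countP (fun x => decide (x ≤ s[j])) := by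
      have h : ((s.take j) ++ (s.drop j)).countP (fun x => decide (x ≤ s[j]))
          = (s.take j).countP (fun x => decide (x ≤ s[j]))
            + (s.drop j).countP (fun x => decide (x ≤ s[j])) := List.countP_append ..
      rwa [List.take_append_drop] at h
    rw [hsum, hta]
    exact_mod_cast by omega

-- A's median expression for a nonempty path equals quickselect at index (len-1)//2
theorem pvMedian_eq (path : List Int) (hne : path ≠ []) :
    (let sorted_path := PySem.List.sorted path (fun x => x) false
     let n : Int := (sorted_path.length : Int)
     if PySem.Int.mod n 2 = 0 then
       (PySem.List.pyGet? sorted_path (PySem.Int.floordiv n 2 - 1)).getD 0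
     else
       (PySem.List.pyGet? sorted_path (PySem.Int.floordiv n 2)).getD 0)
    = pvSelect path (PySem.Int.floordiv ((path.length : Int) - 1) 2) := by
  simp only []
  set s := PySem.List.sorted path (fun x => x) false with hsdef
  have hperm : s.Perm path := PySem.List.sorted_perm ..
  have hsl : s.length = path.length := hperm.length_eq
  set m := path.length with hm
  have hm1 : 1 ≤ m := by
    rcases path with _ | _
    · exact absurd rfl hne
    · simp [hm]
  set j := (m - 1) / 2 with hj
  have hjm : j < m := by omega
  have hjs : j < s.length := by omega
  have hps : s.Pairwise (fun a b => a ≤ b) := by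
    have := PySem.List.sorted_pairwise (xs := path) (key := fun x => x)
    simpa using this
  -- both sides are the j-th smallest of path
  have hA : pvIsKth path (j : Int) s[j] := by
    have := pvSorted_isKth s hps j hjs
    obtain ⟨c1, c2⟩ := this
    refine ⟨?_, ?_⟩
    · rwa [hperm.countP_congr (fun x _ => rfl)] at c1
    · rwa [hperm.countP_congr (fun x _ => rfl)] at c2
  have hfd : PySem.Int.floordiv ((m : Int) - 1) 2 = (j : Int) := by
    have h1 : ((m : Int) - 1) = ((m - 1 : Nat) : Int) := by omega
    rw [h1]
    exact_mod_cast PySem.Int.floordiv_natCast (m - 1) 2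
  have hB : pvIsKth path (j : Int) (pvSelect path (PySem.Int.floordiv ((m : Int) - 1) 2)) := by
    rw [hfd]
    exact pvSelect_isKth path.length path le_rfl (j : Int) (by omega) (by exact_mod_cast hjm)
  have hmod : PySem.Int.mod ((s.length : Int)) 2 = ((m % 2 : Nat) : Int) := by
    rw [hsl]; exact_mod_cast PySem.Int.mod_natCast m 2
  have hdiv : PySem.Int.floordiv ((s.length : Int)) 2 = ((m / 2 : Nat) : Int) := by
    rw [hsl]; exact_mod_cast PySem.Int.floordiv_natCast m 2
  have hAval : (if PySem.Int.mod ((s.length : Int)) 2 = 0 then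
       (PySem.List.pyGet? s (PySem.Int.floordiv ((s.length : Int)) 2 - 1)).getD 0
     else
       (PySem.List.pyGet? s (PySem.Int.floordiv ((s.length : Int)) 2)).getD 0) = s[j] := by
    by_cases hpar : m % 2 = 0
    · rw [if_pos (by rw [hmod, hpar]; simp)]
      have hm2 : 1 ≤ m / 2 := by omega
      have hidx : PySem.Int.floordiv ((s.length : Int)) 2 - 1 = ((m / 2 - 1 : Nat) : Int) := by
        rw [hdiv]; omega
      rw [hidx, PySem.List.pyGet?_natCast]
      have hlt : m / 2 - 1 < s.length := by omega
      rw [List.getElem?_eq_getElem hlt]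
      simp only [Option.getD_some]
      have : m / 2 - 1 = j := by omega
      simp only [this]
    · rw [if_neg (by rw [hmod]; simp only [Nat.cast_eq_zero]; omega)]
      rw [hdiv, PySem.List.pyGet?_natCast]
      have hlt : m / 2 < s.length := by omega
      rw [List.getElem?_eq_getElem hlt]
      simp only [Option.getD_some]
      have : m / 2 = j := by omega
      simp only [this]
  rw [hAval]
  exact pvIsKth_uniq hA hB

-- ===== VERDICT (by name: the statement is the Claim_ definition above) =====
theorem find_median_nodes_py_spec : Claim_equal_find_median_nodes_py := by
  intro paths _ hpre
  unfold Spec_find_median_nodes_py find_median_nodes_py find_median_nodes_py_alt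
  apply PySem.List.foldl_congr_mem
  intro acc path hmem
  exact congrArg (fun z => PySem.Set.add acc z) (pvMedian_eq path (hpre path hmem))
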